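-- pv_equiv track=rewrite | github.com/eadwu/motif-aware-core-periphery | network_analysis/confusion-matrix.py | count_cores_in
-- ===== SOURCE A (Python) =====
-- def is_core_node(value):
--     value = value * 1
--     return value == 1 or value == 2
--
-- def count_cores_in(node_mapping, node_mapping_reference=None):
--     n_cores = 0
--
--     if node_mapping_reference is None:
--         node_mapping_reference = node_mapping
--
--     for k in node_mapping_reference.keys():
--         is_k_core_in_reference = is_core_node(node_mapping_reference[k])
--         is_k_core_in_mapping = k in node_mapping and is_core_node(
--             node_mapping[k])
--
--         if is_k_core_in_reference and is_k_core_in_mapping: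
--             n_cores = n_cores + 1
--
--     return n_cores
-- ===== SOURCE B (Python) =====
-- def is_core_node(value):
--     value = value * 1
--     return value == 1 or value == 2
--
-- def count_cores_in(node_mapping, node_mapping_reference=None):
--     if node_mapping_reference is None:
--         node_mapping_reference = node_mapping
--     core_ref = {k for k, v in node_mapping_reference.items() if is_core_node(v)}
--     core_map = {k for k, v in node_mapping.items() if is_core_node(v)}
--     return len(core_ref & core_map)
-- ===== Notes on version B (the rewrite author's own statement) =====
-- stated objective: idiomatic
-- what changed: Replaces the explicit key loop with its running counter and per-key double lookup by two set comprehensions over the dict items and a set intersection whose size is the answer.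
import Mathlib
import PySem

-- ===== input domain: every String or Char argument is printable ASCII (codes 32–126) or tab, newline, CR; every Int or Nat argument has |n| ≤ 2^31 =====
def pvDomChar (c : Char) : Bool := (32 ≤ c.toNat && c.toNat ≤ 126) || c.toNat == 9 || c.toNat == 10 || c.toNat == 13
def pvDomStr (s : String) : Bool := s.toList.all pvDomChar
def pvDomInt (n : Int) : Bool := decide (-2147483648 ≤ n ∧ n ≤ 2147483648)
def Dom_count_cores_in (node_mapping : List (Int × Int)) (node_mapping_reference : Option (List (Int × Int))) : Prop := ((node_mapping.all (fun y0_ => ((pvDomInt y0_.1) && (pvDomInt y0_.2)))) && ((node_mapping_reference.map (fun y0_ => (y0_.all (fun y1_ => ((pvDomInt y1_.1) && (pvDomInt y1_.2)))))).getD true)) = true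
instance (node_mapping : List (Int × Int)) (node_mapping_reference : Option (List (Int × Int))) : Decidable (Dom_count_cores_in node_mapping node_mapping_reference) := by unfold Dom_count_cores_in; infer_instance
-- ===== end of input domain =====

-- B replaces the explicit key loop (counter + per-key double lookup) by two core-key sets intersected; same cost, more idiomatic.


-- ===== PORT A =====
def is_core_node (value : Int) : Bool :=
  let value := value * 1
  value == 1 || value == 2

def count_cores_in (node_mapping : List (Int × Int)) (node_mapping_reference : Option (List (Int × Int))) : Int :=
  let ref : List (Int × Int) :=
    match node_mapping_reference with
    | none => node_mapping
    | some r => r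
  let m : PySem.Dict Int Int := PySem.Dict.ofList node_mapping
  let r : PySem.Dict Int Int := PySem.Dict.ofList ref
  -- 'for k in reference.keys(): …'; r[k] is exact as 'r.getD k 0' since k is drawn from r.keys
  r.keys.foldl (fun n_cores k =>
    let is_k_core_in_reference := is_core_node (r.getD k 0)
    let is_k_core_in_mapping := m.contains k && is_core_node (m.getD k 0)
    if is_k_core_in_reference && is_k_core_in_mapping then n_cores + 1 else n_cores) 0

-- ===== PORT B =====
def count_cores_in_alt (node_mapping : List (Int × Int)) (node_mapping_reference : Option (List (Int × Int))) : Int :=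
  let ref : List (Int × Int) :=
    match node_mapping_reference with
    | none => node_mapping
    | some r => r
  let core_ref : PySem.Set Int :=
    PySem.Set.ofList (((PySem.Dict.ofList ref).items.filter (fun p => is_core_node p.2)).map Prod.fst)
  let core_map : PySem.Set Int :=
    PySem.Set.ofList (((PySem.Dict.ofList node_mapping).items.filter (fun p => is_core_node p.2)).map Prod.fst)
  PySem.Set.len (PySem.Set.inter core_ref core_map)

-- ===== PRECONDITION & SPEC =====
def Spec_count_cores_in (node_mapping : List (Int × Int)) (node_mapping_reference : Option (List (Int × Int))) (out : Int) : Prop := out = count_cores_in_alt node_mapping node_mapping_reference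
instance (node_mapping : List (Int × Int)) (node_mapping_reference : Option (List (Int × Int))) (out : Int) : Decidable (Spec_count_cores_in node_mapping node_mapping_reference out) := by unfold Spec_count_cores_in; infer_instance

-- ===== CLAIM (what is proved, stated in full; the proofs are below) =====
def Claim_equal_count_cores_in : Prop := ∀ (node_mapping : List (Int × Int)) (node_mapping_reference : Option (List (Int × Int))), Dom_count_cores_in node_mapping node_mapping_reference → Spec_count_cores_in node_mapping node_mapping_reference (count_cores_in node_mapping node_mapping_reference)

-- ===== LEMMAS AND PROOFS =====

-- Filter-then-project over the items equals a countP over the items, given that getD reads back each item's value.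
theorem pv_items_count (M : List (Int × Int)) (c q : Int → Bool) (d : PySem.Dict Int Int)
    (h : ∀ p ∈ M, d.getD p.1 0 = p.2) :
    (((M.filter (fun p => c p.2)).map Prod.fst).filter q).length
      = M.countP (fun p => c (d.getD p.1 0) && q p.1) := by
  induction M with
  | nil => simp
  | cons hd tl ih =>
    have hhd : d.getD hd.1 0 = hd.2 := h hd (by simp)
    have htl : ∀ p ∈ tl, d.getD p.1 0 = p.2 := fun p hp => h p (by simp [hp])
    have ih' := ih htl
    simp only [List.filter_cons, List.countP_cons, hhd]
    by_cases hc : c hd.2 = true <;> by_cases hq : q hd.1 = true <;>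
      simp [hc, hq, ih']

-- Membership in the core-key set of a dict.
theorem pv_core_mem (L : List (Int × Int)) (c : Int → Bool) (k : Int) :
    k ∈ PySem.Set.ofList (((PySem.Dict.ofList L).items.filter (fun p => c p.2)).map Prod.fst)
      ↔ ((PySem.Dict.ofList L).contains k = true ∧ c ((PySem.Dict.ofList L).getD k 0) = true) := by
  set d := PySem.Dict.ofList L with hd
  have hnd : d.keys.Nodup := PySem.Dict.nodup_keys_ofList L
  rw [PySem.Set.mem_ofList]
  constructor
  · rintro hmem
    obtain ⟨p, hp, hpk⟩ := List.mem_map.mp hmem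
    obtain ⟨hpM, hpc⟩ := List.mem_filter.mp hp
    subst hpk
    refine ⟨(PySem.Dict.contains_iff_mem_keys d p.1).mpr (PySem.Dict.mem_keys_of_mem_items _ hpM), ?_⟩
    rw [PySem.Dict.getD_of_mem_items d (k := p.1) (v := p.2) hpM hnd 0]
    exact hpc
  · rintro ⟨hcont, hcv⟩
    have hk : k ∈ d.keys := (PySem.Dict.contains_iff_mem_keys d k).mp hcont
    obtain ⟨p, hpM, hpk⟩ := List.mem_map.mp hk
    have hgd := PySem.Dict.getD_of_mem_items d (k := p.1) (v := p.2) hpM hnd 0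
    subst hpk
    rw [hgd] at hcv
    exact List.mem_map.mpr ⟨p, List.mem_filter.mpr ⟨hpM, hcv⟩, rfl⟩

theorem pv_main (nm ref : List (Int × Int)) :
    (PySem.Dict.ofList ref).keys.foldl (fun n_cores k =>
        let icr := is_core_node ((PySem.Dict.ofList ref).getD k 0)
        let icm := (PySem.Dict.ofList nm).contains k && is_core_node ((PySem.Dict.ofList nm).getD k 0)
        if icr && icm then n_cores + 1 else n_cores) 0
      = PySem.Set.len (PySem.Set.inter
          (PySem.Set.ofList (((PySem.Dict.ofList ref).items.filter (fun p => is_core_node p.2)).map Prod.fst))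
          (PySem.Set.ofList (((PySem.Dict.ofList nm).items.filter (fun p => is_core_node p.2)).map Prod.fst))) := by
  set r := PySem.Dict.ofList ref with hr
  set m := PySem.Dict.ofList nm with hm
  have hndr : r.keys.Nodup := PySem.Dict.nodup_keys_ofList ref
  -- A-side: the counting loop is a countP over r.keys
  rw [PySem.List.foldl_if_add_one
    (p := fun k => is_core_node (r.getD k 0) && (m.contains k && is_core_node (m.getD k 0)))]
  -- B-side: core_ref has no duplicates, so ofList is the identity and inter is a filter
  have hsub : (((r.items.filter (fun p => is_core_node p.2)).map Prod.fst)).Nodup :=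
    hndr.sublist (List.filter_sublist.map Prod.fst)
  rw [show PySem.Set.inter
        (PySem.Set.ofList ((r.items.filter (fun p => is_core_node p.2)).map Prod.fst))
        (PySem.Set.ofList ((m.items.filter (fun p => is_core_node p.2)).map Prod.fst))
      = ((r.items.filter (fun p => is_core_node p.2)).map Prod.fst).filter
          (fun k => PySem.Set.contains (PySem.Set.ofList ((m.items.filter (fun p => is_core_node p.2)).map Prod.fst)) k)
    from by rw [PySem.Set.ofList_eq_self_of_nodup _ hsub]; rfl]
  rw [PySem.Set.len]
  have hread : ∀ p ∈ r.items, r.getD p.1 0 = p.2 := fun p hp => by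
    obtain ⟨k, v⟩ := p; exact PySem.Dict.getD_of_mem_items r hp hndr 0
  rw [pv_items_count r.items is_core_node _ r hread]
  have hkeys : r.keys = r.items.map Prod.fst := rfl
  rw [hkeys, List.countP_map, zero_add]
  congr 1
  apply List.countP_congr
  intro p _
  simp only [Function.comp_apply, Bool.and_eq_true, PySem.Set.contains_iff,
    pv_core_mem nm is_core_node p.1, hm]

-- ===== VERDICT (by name: the statement is the Claim_ definition above) =====
theorem count_cores_in_spec : Claim_equal_count_cores_in := by
  intro nm ref? _
  unfold Spec_count_cores_in count_cores_in count_cores_in_alt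
  cases ref? <;> exact pv_main nm _
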